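-- pv_equiv track=rewrite | github.com/TylerJost/BioinformaticsTools | codonCombinations/codonCombinations.py | genCodonCombo
-- ===== SOURCE A (Python) =====
-- from itertools import product
--
-- def genCodonCombo(seq,codonDict):
--     # Make a list of lists containing the possible combinations
--     codonList = []
--     for protein in seq:
--         codonList.append(codonDict[protein])
--
--     # Use the module product to generate all combinations
--     codonCombo = list(product(*codonList))
--     # Join these together because otherwise they outuput as separated tuples
--     codonComboCombine = []
--     for combo in codonCombo:
--         codonComboCombine.append(''.join(combo))
--     return codonComboCombine
--
-- seq = 'HSYIN'
-- ===== SOURCE B (Python) =====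
-- def genCodonCombo(seq, codonDict):
--     # Fold: grow joined prefix strings directly, one residue at a time.
--     combos = ['']
--     for protein in seq:
--         codons = codonDict[protein]
--         combos = [prefix + codon for prefix in combos for codon in codons]
--     return combos
-- ===== Notes on version B (the rewrite author's own statement) =====
-- stated objective: simpler
-- what changed: Replaces itertools.product over tuples plus a separate ''.join pass with a single fold that grows the joined prefix strings directly, residue by residue.
import Mathlib
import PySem

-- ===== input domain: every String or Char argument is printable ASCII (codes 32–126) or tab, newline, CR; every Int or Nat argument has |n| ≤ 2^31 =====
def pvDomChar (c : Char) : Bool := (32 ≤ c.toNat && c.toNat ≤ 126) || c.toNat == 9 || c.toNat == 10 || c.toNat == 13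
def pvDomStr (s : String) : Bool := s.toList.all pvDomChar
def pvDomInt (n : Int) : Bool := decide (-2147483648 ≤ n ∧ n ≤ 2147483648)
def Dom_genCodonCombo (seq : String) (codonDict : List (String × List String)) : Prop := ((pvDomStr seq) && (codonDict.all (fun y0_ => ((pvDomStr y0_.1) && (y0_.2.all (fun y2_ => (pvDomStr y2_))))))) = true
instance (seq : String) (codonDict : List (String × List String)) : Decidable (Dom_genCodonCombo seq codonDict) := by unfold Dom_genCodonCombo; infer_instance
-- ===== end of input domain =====

-- B replaces A's itertools.product-over-tuples + separate join pass with a single fold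
-- that grows the joined strings directly (objective: simpler / different decomposition).

-- ===== PORT A =====
-- codonDict[protein]: first-match association-list lookup; Pre_ guarantees the key is present,
-- so the total form `.getD []` is only ever used where the lookup succeeds.
def pvLookup (codonDict : List (String × List String)) (c : Char) : List String :=
  (codonDict.lookup (String.ofList [c])).getD []

-- `list(product(*codonList))`: itertools.product, leftmost factor varies slowest.
def pvProduct : List (List String) → List (List String)
  | [] => [[]]
  | l :: ls => l.flatMap (fun x => (pvProduct ls).map (fun t => x :: t))

def genCodonCombo (seq : String) (codonDict : List (String × List String)) : List String :=
  let codonList := seq.toList.map (fun protein => pvLookup codonDict protein)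
  let codonCombo := pvProduct codonList
  codonCombo.map (fun combo => PySem.Str.join "" combo)   -- ''.join(combo)

-- ===== PORT B =====
-- Source B's fold; prefix strings are carried as their code-point lists (string + is List.append
-- on code points, exact) and packed back with String.ofList at the end.
def genCodonCombo_alt (seq : String) (codonDict : List (String × List String)) : List String :=
  (seq.toList.foldl
    (fun combos protein =>
      let codons := (pvLookup codonDict protein).map String.toList
      combos.flatMap (fun pfx => codons.map (fun codon => pfx ++ codon)))
    [([] : List Char)]).map String.ofList

-- ===== PRECONDITION & SPEC =====
-- Pre_ excludes exactly the inputs where Python A raises KeyError: some residue of seq absent from codonDict.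
def Pre_genCodonCombo (seq : String) (codonDict : List (String × List String)) : Prop :=
  (seq.toList.all (fun c => codonDict.any (fun kv => kv.1 == String.ofList [c]))) = true
instance (seq : String) (codonDict : List (String × List String)) : Decidable (Pre_genCodonCombo seq codonDict) := by unfold Pre_genCodonCombo; infer_instance
def pvWitness_genCodonCombo : String × (List (String × List String)) :=
  ("HS", [("H", ["CAC", "CAT"]), ("S", ["AGC"])])

def Spec_genCodonCombo (seq : String) (codonDict : List (String × List String)) (out : List String) : Prop := out = genCodonCombo_alt seq codonDict
instance (seq : String) (codonDict : List (String × List String)) (out : List String) : Decidable (Spec_genCodonCombo seq codonDict out) := by unfold Spec_genCodonCombo; infer_instance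

-- ===== CLAIM (what is proved, stated in full; the proofs are below) =====
def Claim_equal_genCodonCombo : Prop := ∀ (seq : String) (codonDict : List (String × List String)), Dom_genCodonCombo seq codonDict → Pre_genCodonCombo seq codonDict → Spec_genCodonCombo seq codonDict (genCodonCombo seq codonDict)

-- ===== LEMMAS AND PROOFS =====

-- ''.join over a list of strings is the flattened code-point list.
theorem pv_join_empty_sep (combo : List String) :
    PySem.Str.join "" combo = String.ofList ((combo.map String.toList).flatten) := by
  induction combo with
  | nil => rfl
  | cons s t ih =>
      cases t with
      | nil => simp [PySem.Str.join]
      | cons s' t' =>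
          rw [show PySem.Str.join "" (s :: s' :: t') =
            String.ofList (PySem.Chars.join [] (s.toList :: s'.toList :: t'.map String.toList)) from rfl,
            PySem.Chars.join_cons_cons]
          simp only [PySem.Str.join] at ih
          simp_all [List.flatten]

-- B's fold, run from any set of prefixes, appends every flattened product combo to every prefix.
theorem pv_fold_product (codonDict : List (String × List String)) (cs : List Char) :
    ∀ res : List (List Char),
      List.foldl (fun combos protein =>
          combos.flatMap (fun p =>
            ((pvLookup codonDict protein).map String.toList).map (fun codon => p ++ codon))) res cs
      = res.flatMap (fun p =>
          (pvProduct (cs.map (pvLookup codonDict))).map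
            (fun combo => p ++ (combo.map String.toList).flatten)) := by
  induction cs with
  | nil => intro res; simp [pvProduct]
  | cons c cs ih =>
      intro res
      simp only [List.foldl_cons, ih, pvProduct, List.map_cons]
      simp [List.flatMap_assoc, List.map_flatMap, List.flatMap_map, Function.comp_def,
            List.append_assoc]

-- ===== VERDICT (by name: the statement is the Claim_ definition above) =====
theorem genCodonCombo_spec : Claim_equal_genCodonCombo := by
  intro seq codonDict _ _
  unfold Spec_genCodonCombo genCodonCombo genCodonCombo_alt
  simp only [pv_fold_product codonDict seq.toList, pv_join_empty_sep]
  simp
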